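-- pv_equiv track=rewrite | github.com/lfvvercosa/brazilian-justice | core/my_filter.py | filter_autoloop_aux
-- ===== SOURCE A (Python) =====
-- def filter_autoloop_aux(l):
--     count = 0
--     m = []
--
--     for idx, val in enumerate(l):
--         if idx - 1 >= 0:
--             if l[idx - 1] != l[idx]:
--                 count += 1
--         m.append((val, count))
--
--
--     return m
-- ===== SOURCE B (Python) =====
-- def filter_autoloop_aux(l):
--     # Phase 1: split l into runs of consecutive equal elements.
--     runs = []
--     for v in l:
--         if runs and runs[-1][0] == v:
--             runs[-1].append(v)
--         else:
--             runs.append([v])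
--     # Phase 2: label each element with its run index.
--     return [(v, i) for i, run in enumerate(runs) for v in run]
-- ===== Notes on version B (the rewrite author's own statement) =====
-- stated objective: alternative
-- what changed: Instead of one accumulator pass that looks back via l[idx-1] and carries a running change counter, B first groups the list into runs of consecutive equal elements and then labels each element with its run index in a second pass.
import Mathlib
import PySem

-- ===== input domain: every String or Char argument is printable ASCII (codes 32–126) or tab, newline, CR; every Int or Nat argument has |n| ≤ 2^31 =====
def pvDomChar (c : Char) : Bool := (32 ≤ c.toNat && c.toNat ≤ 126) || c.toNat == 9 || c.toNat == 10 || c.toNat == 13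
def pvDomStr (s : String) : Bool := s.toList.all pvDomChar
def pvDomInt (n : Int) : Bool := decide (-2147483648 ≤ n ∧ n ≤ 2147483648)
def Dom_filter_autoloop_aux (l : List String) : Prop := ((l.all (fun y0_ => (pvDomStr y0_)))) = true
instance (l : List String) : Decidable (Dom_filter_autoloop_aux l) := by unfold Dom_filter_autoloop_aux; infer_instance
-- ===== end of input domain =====

-- B replaces A's single lookback-indexing pass (running change counter) by a two-phase
-- decomposition: group the list into runs of consecutive equal elements, then label each
-- element with its run index ('alternative'; same asymptotic cost).

-- ===== PORT A =====
-- literal port of A: enumerate, guard idx-1>=0, compare l[idx-1] with l[idx] (pyGet?),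
-- bump the count, append (val, count) to the accumulator.
def filter_autoloop_aux (l : List String) : List (String × Int) :=
  ((PySem.List.enumerate l).foldl
    (fun (st : Int × List (String × Int)) p =>
      let count := if p.1 - 1 ≥ 0 ∧ PySem.List.pyGet? l (p.1 - 1) ≠ PySem.List.pyGet? l p.1
                   then st.1 + 1 else st.1
      (count, st.2 ++ [(p.2, count)]))
    (0, [])).2

-- ===== PORT B =====
-- one step of Source B's grouping loop body: `runs[-1]` is pyGet? rs (-1), `runs[-1][0]` its
-- element 0, and `runs[-1].append(v)` rebuilds the list with the last group extended.
def pvStep (rs : List (List String)) (v : String) : List (List String) :=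
  if rs ≠ [] ∧ PySem.List.pyGet? ((PySem.List.pyGet? rs (-1)).getD []) 0 = some v
  then rs.dropLast ++ [((PySem.List.pyGet? rs (-1)).getD []) ++ [v]]
  else rs ++ [[v]]

def filter_autoloop_aux_alt (l : List String) : List (String × Int) :=
  (PySem.List.enumerate (l.foldl pvStep [])).flatMap
    (fun p => p.2.map (fun v => (v, p.1)))

-- ===== PRECONDITION & SPEC =====
def Spec_filter_autoloop_aux (l : List String) (out : List (String × Int)) : Prop := out = filter_autoloop_aux_alt l
instance (l : List String) (out : List (String × Int)) : Decidable (Spec_filter_autoloop_aux l out) := by unfold Spec_filter_autoloop_aux; infer_instance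

-- ===== CLAIM (what is proved, stated in full; the proofs are below) =====
def Claim_equal_filter_autoloop_aux : Prop := ∀ (l : List String), Dom_filter_autoloop_aux l → Spec_filter_autoloop_aux l (filter_autoloop_aux l)

-- ===== LEMMAS AND PROOFS =====

-- common specification: label each element, bumping the counter when it differs from prev
def labA : Int → Option String → List String → List (String × Int)
  | _, _, [] => []
  | c, prev, y :: ys =>
      let c' := if prev ≠ none ∧ prev ≠ some y then c + 1 else c
      (y, c') :: labA c' (some y) ys

-- head-first recursion computing the runs (proof-side mirror of the grouping loop)
def pvRunsRec : List String → List (List String)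
  | [] => []
  | x :: xs =>
      (x :: xs.takeWhile (fun y => y == x)) :: pvRunsRec (xs.dropWhile (fun y => y == x))
  termination_by l => l.length
  decreasing_by
    simp only [List.length_cons]
    exact Nat.lt_succ_of_le (List.length_dropWhile_le _ _)

lemma pvRunsRec_nil : pvRunsRec [] = [] := by unfold pvRunsRec; rfl

lemma pvRunsRec_cons (x : String) (xs : List String) :
    pvRunsRec (x :: xs)
      = (x :: xs.takeWhile (fun y => y == x)) :: pvRunsRec (xs.dropWhile (fun y => y == x)) := by
  conv_lhs => unfold pvRunsRec

-- emit runs with labels starting at k (what B's flatMap-over-enumerate computes)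
def emit : Int → List (List String) → List (String × Int)
  | _, [] => []
  | k, g :: gs => g.map (fun v => (v, k)) ++ emit (k + 1) gs

lemma enum_flat (gs : List (List String)) : ∀ (k : Int),
    (PySem.List.enumerate gs k).flatMap (fun p => p.2.map (fun v => (v, p.1))) = emit k gs := by
  induction gs with
  | nil => intro k; rw [PySem.List.enumerate_nil]; rfl
  | cons g gs ih => intro k; rw [PySem.List.enumerate_cons]; simp [emit, ih]

lemma foldl_step_runs (xs : List String) : ∀ (rs : List (List String)) (g : List String) (h : String),
    g.head? = some h →
    xs.foldl pvStep (rs ++ [g])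
      = rs ++ (g ++ xs.takeWhile (fun y => y == h)) :: pvRunsRec (xs.dropWhile (fun y => y == h)) := by
  induction xs with
  | nil => intro rs g h hg; simp [pvRunsRec_nil]
  | cons v vs ih =>
    intro rs g h hg
    obtain ⟨t, rfl⟩ : ∃ t, g = h :: t := by
      cases g with
      | nil => simp at hg
      | cons a t =>
        rw [List.head?_cons, Option.some_inj] at hg
        exact ⟨t, by rw [hg]⟩
    have hlast : PySem.List.pyGet? (rs ++ [h :: t]) (-1) = some (h :: t) := by
      rw [PySem.List.pyGet?_neg_one, List.getLast?_concat]
    have hstep : pvStep (rs ++ [h :: t]) v =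
        if h = v then rs ++ [(h :: t) ++ [v]] else (rs ++ [h :: t]) ++ [[v]] := by
      unfold pvStep
      rw [hlast]
      simp only [Option.getD_some, PySem.List.pyGet?_zero_cons, Option.some_inj]
      by_cases hv : h = v
      · rw [if_pos ⟨by simp, hv⟩, if_pos hv, List.dropLast_concat]
      · rw [if_neg (by simp [hv]), if_neg hv]
    by_cases hv : (v == h)
    · have hv' : h = v := (beq_iff_eq.mp hv).symm
      rw [List.foldl_cons, hstep, if_pos hv']
      rw [ih rs ((h :: t) ++ [v]) h (by simp)]
      simp [hv]
    · have hv' : ¬ h = v := fun e => (by simp [e] at hv)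
      rw [List.foldl_cons, hstep, if_neg hv']
      rw [ih (rs ++ [h :: t]) [v] v (by simp)]
      simp [hv, pvRunsRec_cons]

lemma foldl_step_eq (l : List String) : l.foldl pvStep [] = pvRunsRec l := by
  cases l with
  | nil => simp [pvRunsRec_nil]
  | cons x xs =>
    have h0 : pvStep [] x = [] ++ [[x]] := by simp [pvStep]
    rw [List.foldl_cons, h0, foldl_step_runs xs [] [x] x (by simp), pvRunsRec_cons]
    simp

lemma labA_const (t : List String) : ∀ (x : String) (c : Int) (r : List String),
    (∀ y ∈ t, y = x) → labA c (some x) (t ++ r) = t.map (fun v => (v, c)) ++ labA c (some x) r := by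
  induction t with
  | nil => intro x c r _; simp
  | cons y t ih =>
    intro x c r hall
    have hy : y = x := hall y (by simp)
    subst hy
    simp only [List.cons_append, labA, List.map_cons]
    rw [if_neg (by simp)]
    simp [ih y c r (fun z hz => hall z (by simp [hz]))]

lemma take_all_eq (x : String) (xs : List String) :
    ∀ z ∈ xs.takeWhile (fun y => y == x), z = x := by
  intro z hz
  have hb : (fun y => y == x) z = true :=
    List.mem_takeWhile_imp (p := fun y => y == x) (l := xs) hz
  exact beq_iff_eq.mp hb

lemma drop_head_ne (x : String) (xs : List String) :
    ∀ h, (xs.dropWhile (fun y => y == x)).head? = some h → h ≠ x := by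
  intro h hhd he
  have hb := List.head?_dropWhile_not (fun y => y == x) xs
  rw [hhd] at hb
  rw [he] at hb
  simp at hb

lemma B_gen : ∀ (n : Nat) (r : List String), r.length ≤ n → ∀ (c : Int) (x : String),
    (∀ h, r.head? = some h → h ≠ x) →
    labA c (some x) r = emit (c + 1) (pvRunsRec r) := by
  intro n
  induction n with
  | zero =>
    intro r hr c x _
    have : r = [] := List.eq_nil_of_length_eq_zero (Nat.le_zero.mp hr)
    subst this
    simp [pvRunsRec_nil, labA, emit]
  | succ n ih =>
    intro r hr c x hh
    cases r with
    | nil => simp [pvRunsRec_nil, labA, emit]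
    | cons y ys =>
      have hyx : y ≠ x := hh y rfl
      have hsplit : ys = ys.takeWhile (fun z => z == y) ++ ys.dropWhile (fun z => z == y) :=
        (List.takeWhile_append_dropWhile).symm
      simp only [labA]
      rw [if_pos (by simp [Ne.symm hyx])]
      conv_lhs => rw [hsplit]
      rw [labA_const _ y (c + 1) _ (take_all_eq y ys)]
      rw [ih (ys.dropWhile (fun z => z == y))
            (le_trans (List.length_dropWhile_le _ _) (by simpa using hr))
            (c + 1) y (drop_head_ne y ys)]
      rw [pvRunsRec_cons]
      simp [emit]

lemma B_eq_labA (l : List String) : filter_autoloop_aux_alt l = labA 0 none l := by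
  unfold filter_autoloop_aux_alt
  rw [foldl_step_eq, enum_flat]
  cases l with
  | nil => simp [pvRunsRec_nil, labA, emit]
  | cons x xs =>
    have hsplit : xs = xs.takeWhile (fun z => z == x) ++ xs.dropWhile (fun z => z == x) :=
      (List.takeWhile_append_dropWhile).symm
    rw [pvRunsRec_cons]
    simp only [labA]
    rw [if_neg (by simp)]
    conv_rhs => rw [hsplit]
    rw [labA_const _ x 0 _ (take_all_eq x xs)]
    rw [B_gen (xs.dropWhile (fun z => z == x)).length _ le_rfl 0 x (drop_head_ne x xs)]
    simp [emit]

lemma A_gen (suf : List String) : ∀ (pre : List String) (c : Int) (acc : List (String × Int)),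
    ((PySem.List.enumerate suf (pre.length : Int)).foldl
      (fun (st : Int × List (String × Int)) p =>
        let count := if p.1 - 1 ≥ 0 ∧ PySem.List.pyGet? (pre ++ suf) (p.1 - 1) ≠ PySem.List.pyGet? (pre ++ suf) p.1
                     then st.1 + 1 else st.1
        (count, st.2 ++ [(p.2, count)]))
      (c, acc)).2
    = acc ++ labA c pre.getLast? suf := by
  induction suf with
  | nil => intro pre c acc; simp [PySem.List.enumerate_nil, labA]
  | cons y ys ih =>
    intro pre c acc
    rw [PySem.List.enumerate_cons, List.foldl_cons]
    have hmid : PySem.List.pyGet? (pre ++ y :: ys) (pre.length : Int) = some y :=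
      PySem.List.pyGet?_append_length pre ys y
    by_cases hpre : pre = []
    · subst hpre
      have hcond : ¬ (((List.length ([] : List String) : Int)) - 1 ≥ 0 ∧
          PySem.List.pyGet? ([] ++ y :: ys) (((List.length ([] : List String)) : Int) - 1)
            ≠ PySem.List.pyGet? ([] ++ y :: ys) ((List.length ([] : List String)) : Int)) := by
        simp
      simp only [hcond, if_neg, not_false_eq_true]
      have h1 : ((List.length ([] : List String) : Int)) + 1 = ((List.length [y] : Nat) : Int) := by simp
      have h2 : ([] : List String) ++ y :: ys = [y] ++ ys := by simp
      rw [h1, h2, ih [y] c (acc ++ [(y, c)])]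
      simp [labA]
    · obtain ⟨p, hp⟩ := List.getLast?_isSome.mpr hpre |> Option.isSome_iff_exists.mp
      have hlen : 1 ≤ pre.length := List.length_pos_iff.mpr hpre
      have hprev : PySem.List.pyGet? (pre ++ y :: ys) ((pre.length : Int) - 1) = some p := by
        have hcast : (pre.length : Int) - 1 = ((pre.length - 1 : Nat) : Int) := by omega
        rw [hcast, PySem.List.pyGet?_natCast]
        rw [List.getElem?_append_left (by omega)]
        rw [← List.getLast?_eq_getElem?] at *
        exact hp
      have hcond : ((pre.length : Int) - 1 ≥ 0 ∧
          PySem.List.pyGet? (pre ++ y :: ys) ((pre.length : Int) - 1)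
            ≠ PySem.List.pyGet? (pre ++ y :: ys) (pre.length : Int))
          ↔ (pre.getLast? ≠ none ∧ pre.getLast? ≠ some y) := by
        rw [hmid, hprev, hp]
        constructor
        · rintro ⟨-, hne⟩; exact ⟨by simp, by simpa using hne⟩
        · rintro ⟨-, hne⟩; exact ⟨by omega, by simpa using hne⟩
      by_cases hc : pre.getLast? ≠ none ∧ pre.getLast? ≠ some y
      · rw [if_pos (hcond.mpr hc)]
        have h1 : (pre.length : Int) + 1 = (((pre ++ [y]).length : Nat) : Int) := by simp
        have h2 : pre ++ y :: ys = (pre ++ [y]) ++ ys := by simp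
        rw [h1, h2, ih (pre ++ [y]) (c + 1) (acc ++ [(y, c + 1)])]
        simp [labA, hc]
      · rw [if_neg (fun hx => hc (hcond.mp hx))]
        have h1 : (pre.length : Int) + 1 = (((pre ++ [y]).length : Nat) : Int) := by simp
        have h2 : pre ++ y :: ys = (pre ++ [y]) ++ ys := by simp
        have hy : pre.getLast? = some y := by
          by_cases hn : pre.getLast? = some y
          · exact hn
          · exact absurd ⟨by simp [hp], hn⟩ hc
        rw [h1, h2, ih (pre ++ [y]) c (acc ++ [(y, c)])]
        simp [labA, hy]

lemma A_eq_labA (l : List String) : filter_autoloop_aux l = labA 0 none l := by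
  unfold filter_autoloop_aux
  have := A_gen l [] 0 []
  simpa using this

-- ===== VERDICT (by name: the statement is the Claim_ definition above) =====
theorem filter_autoloop_aux_spec : Claim_equal_filter_autoloop_aux := by
  intro l _
  unfold Spec_filter_autoloop_aux
  rw [A_eq_labA, B_eq_labA]
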